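-- pv_equiv track=rewrite | github.com/leolu66/61sClaw | workspace-main/skills/wechat-article-fetcher/scripts/article_list_fetcher.py | _select_best_match
-- ===== SOURCE A (Python) =====
-- from typing import List, Dict, Optional
--
-- def _select_best_match(accounts: List[Dict], keyword: str) -> Dict:
--     """选择最匹配的公众号"""
--     keyword_lower = keyword.lower()
--
--     # 优先完全匹配
--     for account in accounts:
--         if account.get('nickname', '').lower() == keyword_lower:
--             return account
--
--     # 其次包含匹配
--     for account in accounts:
--         if keyword_lower in account.get('nickname', '').lower():
--             return account
--
--     # 默认返回第一个
--     return accounts[0] if accounts else {}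
-- ===== SOURCE B (Python) =====
-- def _select_best_match(accounts, keyword):
--     keyword_lower = keyword.lower()
--     candidate = None
--     for account in accounts:
--         nick = account.get('nickname', '').lower()
--         if nick == keyword_lower:
--             return account
--         if candidate is None and keyword_lower in nick:
--             candidate = account
--     if candidate is not None:
--         return candidate
--     return accounts[0] if accounts else {}
-- ===== Notes on version B (the rewrite author's own statement) =====
-- stated objective: simpler
-- what changed: Two sequential scans (exact match, then substring match) are merged into one pass that returns immediately on an exact match and remembers only the first substring match in a candidate variable.
import Mathlib
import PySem

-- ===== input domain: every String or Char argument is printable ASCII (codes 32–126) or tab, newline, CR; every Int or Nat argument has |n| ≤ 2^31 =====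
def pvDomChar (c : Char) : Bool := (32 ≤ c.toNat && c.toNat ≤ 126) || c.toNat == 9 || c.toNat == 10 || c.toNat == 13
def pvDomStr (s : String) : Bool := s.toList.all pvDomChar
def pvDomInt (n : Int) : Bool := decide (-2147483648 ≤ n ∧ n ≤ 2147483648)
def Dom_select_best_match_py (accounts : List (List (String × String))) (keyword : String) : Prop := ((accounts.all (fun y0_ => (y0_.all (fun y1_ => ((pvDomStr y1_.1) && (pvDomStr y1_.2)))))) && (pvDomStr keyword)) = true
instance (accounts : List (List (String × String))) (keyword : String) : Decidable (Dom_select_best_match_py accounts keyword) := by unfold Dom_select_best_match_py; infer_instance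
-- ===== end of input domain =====

-- B replaces A's two sequential scans by one pass that returns on an exact match and stores the first substring match in a candidate (simpler decomposition).

-- ===== PORT A =====
-- A: first scan for an exact (lowercased) match, then a scan for a substring match, else accounts[0] or {}.
def select_best_match_py (accounts : List (List (String × String))) (keyword : String) : List (String × String) :=
  match accounts.find? (fun account => PySem.Str.lower (PySem.Dict.getD (PySem.Dict.mk account) "nickname" "") == PySem.Str.lower keyword) with
  | some account => account
  | none =>
    match accounts.find? (fun account => PySem.Str.isIn (PySem.Str.lower keyword) (PySem.Str.lower (PySem.Dict.getD (PySem.Dict.mk account) "nickname" ""))) with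
    | some account => account
    | none => match accounts with
              | [] => []
              | a :: _ => a

-- ===== PORT B =====
-- single pass: return on exact match, remember the first substring match in `cand`
def selGo (kl : String) (cand : Option (List (String × String))) :
    List (List (String × String)) → Option (List (String × String))
  | [] => cand
  | account :: rest =>
    let nick := PySem.Str.lower (PySem.Dict.getD (PySem.Dict.mk account) "nickname" "")
    if nick == kl then some account
    else selGo kl (if cand.isNone && PySem.Str.isIn kl nick then some account else cand) rest

def select_best_match_py_alt (accounts : List (List (String × String))) (keyword : String) : List (String × String) :=
  match selGo (PySem.Str.lower keyword) none accounts with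
  | some account => account
  | none => match accounts with
            | [] => []
            | a :: _ => a

-- ===== PRECONDITION & SPEC =====
def Spec_select_best_match_py (accounts : List (List (String × String))) (keyword : String) (out : List (String × String)) : Prop := out = select_best_match_py_alt accounts keyword
instance (accounts : List (List (String × String))) (keyword : String) (out : List (String × String)) : Decidable (Spec_select_best_match_py accounts keyword out) := by unfold Spec_select_best_match_py; infer_instance

-- ===== CLAIM (what is proved, stated in full; the proofs are below) =====
def Claim_equal_select_best_match_py : Prop := ∀ (accounts : List (List (String × String))) (keyword : String), Dom_select_best_match_py accounts keyword → Spec_select_best_match_py accounts keyword (select_best_match_py accounts keyword)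

-- ===== LEMMAS AND PROOFS =====

-- selGo's result: the first exact match if any, else the incoming candidate, else the first substring match.
theorem selGo_eq (kl : String) (cand : Option (List (String × String)))
    (l : List (List (String × String))) :
    selGo kl cand l =
      match l.find? (fun a => PySem.Str.lower (PySem.Dict.getD (PySem.Dict.mk a) "nickname" "") == kl) with
      | some a => some a
      | none =>
        match cand with
        | some c => some c
        | none => l.find? (fun a => PySem.Str.isIn kl (PySem.Str.lower (PySem.Dict.getD (PySem.Dict.mk a) "nickname" ""))) := by
  induction l generalizing cand with
  | nil => cases cand <;> simp [selGo]
  | cons a rest ih =>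
    by_cases hx : (PySem.Str.lower (PySem.Dict.getD (PySem.Dict.mk a) "nickname" "") == kl) = true
    · simp [selGo, hx, List.find?]
    · simp only [Bool.not_eq_true] at hx
      cases cand with
      | some c =>
        simp [selGo, hx, List.find?, ih]
      | none =>
        by_cases hs : PySem.Chars.isIn kl.toList (PySem.Chars.lower ((PySem.Dict.mk a).getD "nickname" "").toList) = true
        · simp [selGo, PySem.Str.isIn, hx, hs, List.find?, ih]
        · simp only [Bool.not_eq_true] at hs
          simp [selGo, PySem.Str.isIn, hx, hs, List.find?, ih]

-- ===== VERDICT (by name: the statement is the Claim_ definition above) =====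
theorem select_best_match_py_spec : Claim_equal_select_best_match_py := by
  intro accounts keyword _
  unfold Spec_select_best_match_py select_best_match_py select_best_match_py_alt
  rw [selGo_eq]
  cases hx : accounts.find? (fun a => PySem.Str.lower (PySem.Dict.getD (PySem.Dict.mk a) "nickname" "") == PySem.Str.lower keyword) with
  | some a => rfl
  | none =>
    cases hs : accounts.find? (fun a => PySem.Str.isIn (PySem.Str.lower keyword) (PySem.Str.lower (PySem.Dict.getD (PySem.Dict.mk a) "nickname" ""))) with
    | some a => rfl
    | none => cases accounts <;> rfl
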